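-- pv_equiv track=rewrite | github.com/rawagiha/variantPost | variantpost/phaser.py | near_lt_pos
-- ===== SOURCE A (Python) =====
-- def near_lt_pos(pos, contig_dict, is_left):
--     if is_left:
--         not_found = True
--     else:
--         not_found = False if contig_dict.get(pos, None) else True
--
--     contig_start = list(contig_dict.keys())[0]
--     while not_found and contig_start < pos:
--         pos -= 1
--         _data = contig_dict.get(pos, False)
--         if _data:
--             not_found = False
--
--             # del involved
--             if len(_data[0]) > 1:
--                 pos += len(_data[0])
--     return pos
-- ===== SOURCE B (Python) =====
-- def near_lt_pos(pos, contig_dict, is_left):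
--     contig_start = next(iter(contig_dict))
--     if not is_left and contig_dict.get(pos):
--         return pos
--     best = None
--     for k, v in contig_dict.items():
--         if contig_start <= k < pos and v and (best is None or best < k):
--             best = k
--     if best is None:
--         return contig_start if contig_start < pos else pos
--     first = contig_dict[best][0]
--     return best + len(first) if len(first) > 1 else best
-- ===== Notes on version B (the rewrite author's own statement) =====
-- stated objective: alternative
-- what changed: A walks positions one by one from pos-1 downward, probing the dict at each position until it hits a key with non-empty data; B instead makes a single pass over the dict items keeping the largest key in [contig_start, pos) with non-empty data, then applies the same deletion-length adjustment.
-- outside the precondition, e.g. on near_lt_pos(3, {}, True): A raises IndexError, B raises StopIteration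
import Mathlib
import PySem

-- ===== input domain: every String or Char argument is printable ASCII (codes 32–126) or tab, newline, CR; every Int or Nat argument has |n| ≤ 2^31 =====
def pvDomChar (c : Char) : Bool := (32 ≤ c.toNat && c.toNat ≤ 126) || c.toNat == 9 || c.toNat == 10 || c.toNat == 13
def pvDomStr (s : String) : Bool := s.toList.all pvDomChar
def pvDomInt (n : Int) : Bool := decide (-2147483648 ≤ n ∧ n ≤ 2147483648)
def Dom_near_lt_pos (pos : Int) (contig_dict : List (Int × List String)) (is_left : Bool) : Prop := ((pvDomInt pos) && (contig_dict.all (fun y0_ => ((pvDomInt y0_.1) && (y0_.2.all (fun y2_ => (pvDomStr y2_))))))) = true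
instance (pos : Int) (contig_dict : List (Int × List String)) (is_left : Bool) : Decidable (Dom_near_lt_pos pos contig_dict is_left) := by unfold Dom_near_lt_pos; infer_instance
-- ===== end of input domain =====

-- B replaces A's position-by-position downward scan with a single pass over the
-- dict items that keeps the largest qualifying key (objective: alternative).


-- ===== PORT A =====
-- dict.get on the association-list encoding of a Python dict: first match
def dget (d : List (Int × List String)) (k : Int) : Option (List String) :=
  match d with
  | [] => none
  | (k', v) :: rest => if k' = k then some v else dget rest k

-- Python truthiness of dict.get(k, default-falsy): some non-empty list
def dtruthy (d : List (Int × List String)) (k : Int) : Bool :=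
  match dget d k with
  | some (_ :: _) => true
  | _ => false

-- the while loop of A: decrement pos while contig_start < pos; stop at the first
-- key with truthy data, adding len(_data[0]) when that exceeds 1
def nearLoopA (d : List (Int × List String)) (contig_start : Int) (pos : Int) : Int :=
  if _h : contig_start < pos then
    let pos' := pos - 1
    match dget d pos' with
    | some (s :: _) =>
        if PySem.Str.len s > 1 then pos' + PySem.Str.len s else pos'
    | _ => nearLoopA d contig_start pos'
  else pos
termination_by (pos - contig_start).toNat
decreasing_by omega

def near_lt_pos (pos : Int) (contig_dict : List (Int × List String)) (is_left : Bool) : Int :=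
  let not_found := if is_left then true else !(dtruthy contig_dict pos)
  let contig_start := match contig_dict with | [] => 0 | (k, _) :: _ => k  -- keys[0]; Pre_ excludes []
  if not_found then nearLoopA contig_dict contig_start pos else pos

-- ===== PORT B =====
-- one pass over the items keeping the largest key in [contig_start, pos) with truthy data
def bestKeyB (contig_start pos : Int) (d : List (Int × List String)) : Option Int :=
  d.foldl
    (fun b kv =>
      if contig_start ≤ kv.1 ∧ kv.1 < pos ∧ kv.2 ≠ [] ∧ (∀ m ∈ b, m < kv.1) then some kv.1 else b)
    none

def near_lt_pos_alt (pos : Int) (contig_dict : List (Int × List String)) (is_left : Bool) : Int :=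
  let contig_start := match contig_dict with | [] => 0 | (k, _) :: _ => k
  if !is_left && dtruthy contig_dict pos then pos
  else
    match bestKeyB contig_start pos contig_dict with
    | none => if contig_start < pos then contig_start else pos
    | some k =>
        let first := match dget contig_dict k with | some (s :: _) => s | _ => ""
        if PySem.Str.len first > 1 then k + PySem.Str.len first else k

-- ===== PRECONDITION & SPEC =====
-- Pre_ excludes the empty dict, on which A raises IndexError at list(contig_dict.keys())[0],
-- and association lists with duplicate keys, which do not encode any Python dict.
def Pre_near_lt_pos (pos : Int) (contig_dict : List (Int × List String)) (is_left : Bool) : Prop :=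
  contig_dict ≠ [] ∧ (contig_dict.map Prod.fst).Nodup
instance (pos : Int) (contig_dict : List (Int × List String)) (is_left : Bool) : Decidable (Pre_near_lt_pos pos contig_dict is_left) := by unfold Pre_near_lt_pos; infer_instance

def pvWitness_near_lt_pos : Int × (List (Int × List String)) × Bool := (5, [(1, ["ab"]), (3, [])], false)

def Spec_near_lt_pos (pos : Int) (contig_dict : List (Int × List String)) (is_left : Bool) (out : Int) : Prop := out = near_lt_pos_alt pos contig_dict is_left
instance (pos : Int) (contig_dict : List (Int × List String)) (is_left : Bool) (out : Int) : Decidable (Spec_near_lt_pos pos contig_dict is_left out) := by unfold Spec_near_lt_pos; infer_instance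

-- ===== CLAIM (what is proved, stated in full; the proofs are below) =====
def Claim_equal_near_lt_pos : Prop := ∀ (pos : Int) (contig_dict : List (Int × List String)) (is_left : Bool), Dom_near_lt_pos pos contig_dict is_left → Pre_near_lt_pos pos contig_dict is_left → Spec_near_lt_pos pos contig_dict is_left (near_lt_pos pos contig_dict is_left)

-- ===== LEMMAS AND PROOFS =====

-- dget finds a member
theorem dget_mem {d : List (Int × List String)} {k : Int} {v : List String}
    (h : dget d k = some v) : (k, v) ∈ d := by
  induction d with
  | nil => simp [dget] at h
  | cons kv t ih =>
    obtain ⟨k', v'⟩ := kv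
    simp only [dget] at h
    split_ifs at h with he
    · cases h; subst he; exact List.mem_cons_self
    · exact List.mem_cons_of_mem _ (ih h)

-- with distinct keys, a member is found by dget
theorem mem_dget {d : List (Int × List String)} {k : Int} {v : List String}
    (hnd : (d.map Prod.fst).Nodup) (h : (k, v) ∈ d) : dget d k = some v := by
  induction d with
  | nil => simp at h
  | cons kv t ih =>
    obtain ⟨k', v'⟩ := kv
    simp only [List.map_cons, List.nodup_cons] at hnd
    rcases List.mem_cons.1 h with h1 | h1
    · cases h1; simp [dget]
    · have hne : k' ≠ k := fun he =>
        hnd.1 (List.mem_map.2 ⟨(k, v), h1, by simp [he]⟩)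
      simp only [dget, if_neg hne]
      exact ih hnd.2 h1

theorem dtruthy_iff {d : List (Int × List String)} {k : Int} :
    dtruthy d k = true ↔ ∃ v, dget d k = some v ∧ v ≠ [] := by
  unfold dtruthy
  rcases h : dget d k with _ | v
  · simp
  · cases v with
    | nil => simp
    | cons s t => simp

-- characterization of B's fold
theorem bestKeyB_go {cs pos : Int} (d : List (Int × List String)) :
    ∀ acc : Option Int,
      (d.foldl (fun b kv =>
          if cs ≤ kv.1 ∧ kv.1 < pos ∧ kv.2 ≠ [] ∧ (∀ m ∈ b, m < kv.1) then some kv.1 else b) acc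
        = none ↔ acc = none ∧ ∀ kv ∈ d, ¬(cs ≤ kv.1 ∧ kv.1 < pos ∧ kv.2 ≠ [])) ∧
      (∀ m, d.foldl (fun b kv =>
          if cs ≤ kv.1 ∧ kv.1 < pos ∧ kv.2 ≠ [] ∧ (∀ m ∈ b, m < kv.1) then some kv.1 else b) acc
        = some m →
        (acc = some m ∨ (cs ≤ m ∧ m < pos ∧ ∃ v, (m, v) ∈ d ∧ v ≠ [])) ∧
        (∀ kv ∈ d, cs ≤ kv.1 → kv.1 < pos → kv.2 ≠ [] → kv.1 ≤ m) ∧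
        (∀ j, acc = some j → j ≤ m)) := by
  induction d with
  | nil =>
    intro acc
    refine ⟨by simp, ?_⟩
    intro m h; simp at h
    exact ⟨Or.inl h, by simp, fun j hj => by simp [h] at hj; omega⟩
  | cons kv t ih =>
    intro acc
    obtain ⟨k, v⟩ := kv
    simp only [List.foldl_cons]
    by_cases hc : cs ≤ k ∧ k < pos ∧ v ≠ [] ∧ (∀ m ∈ acc, m < k)
    · rw [if_pos hc]
      obtain ⟨ihn, ihs⟩ := ih (some k)
      constructor
      · constructor
        · intro h; rw [ihn] at h; simp at h
        · rintro ⟨_, hall⟩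
          exact absurd ⟨hc.1, hc.2.1, hc.2.2.1⟩ (hall (k, v) List.mem_cons_self)
      · intro m hm
        obtain ⟨h1, h2, h3⟩ := ihs m hm
        have hkm : k ≤ m := h3 k rfl
        refine ⟨?_, ?_, ?_⟩
        · rcases h1 with h1 | h1
          · cases h1
            exact Or.inr ⟨hc.1, hc.2.1, v, List.mem_cons_self, hc.2.2.1⟩
          · obtain ⟨a1, a2, v', hv', a3⟩ := h1
            exact Or.inr ⟨a1, a2, v', List.mem_cons_of_mem _ hv', a3⟩
        · rintro ⟨k1, v1⟩ hkv' b1 b2 b3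
          rcases List.mem_cons.1 hkv' with h | h
          · obtain ⟨rfl, rfl⟩ := Prod.mk.injEq .. ▸ h
            exact hkm
          · exact h2 (k1, v1) h b1 b2 b3
        · intro j hj
          have := hc.2.2.2 j hj
          omega
    · rw [if_neg hc]
      obtain ⟨ihn, ihs⟩ := ih acc
      constructor
      · rw [ihn]
        constructor
        · rintro ⟨ha, hall⟩
          refine ⟨ha, ?_⟩
          intro kv' hkv'
          rcases List.mem_cons.1 hkv' with h | h
          · subst h
            rintro ⟨b1, b2, b3⟩
            exact hc ⟨b1, b2, b3, by simp [ha]⟩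
          · exact hall kv' h
        · rintro ⟨ha, hall⟩
          exact ⟨ha, fun kv' h => hall kv' (List.mem_cons_of_mem _ h)⟩
      · intro m hm
        obtain ⟨h1, h2, h3⟩ := ihs m hm
        refine ⟨?_, ?_, h3⟩
        · rcases h1 with h1 | h1
          · exact Or.inl h1
          · obtain ⟨a1, a2, v', hv', a3⟩ := h1
            exact Or.inr ⟨a1, a2, v', List.mem_cons_of_mem _ hv', a3⟩
        · rintro ⟨k1, v1⟩ hkv' b1 b2 b3
          rcases List.mem_cons.1 hkv' with h | h
          · obtain ⟨rfl, rfl⟩ := Prod.mk.injEq .. ▸ h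
            -- the condition failed though (k1, v1) qualifies: acc = some j with k1 ≤ j
            simp only [not_and] at hc
            rcases hacc : acc with _ | j
            · exact absurd (by simp [hacc]) (hc b1 b2 b3)
            · have hno : ¬ (∀ x ∈ acc, x < k1) := fun hall => hc b1 b2 b3 hall
              have hkj : k1 ≤ j := by
                by_contra hlt
                exact hno (by intro x hx; rw [hacc] at hx; cases hx; omega)
              have := h3 j hacc
              omega
          · exact h2 (k1, v1) h b1 b2 b3

-- A's loop when no position in [cs, pos) has truthy data
theorem nearLoopA_none (d : List (Int × List String)) (cs : Int) :
    ∀ n (pos : Int), (pos - cs).toNat = n →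
      (∀ k, cs ≤ k → k < pos → dtruthy d k = false) →
      nearLoopA d cs pos = if cs < pos then cs else pos := by
  intro n
  induction n with
  | zero =>
    intro pos hn _
    rw [nearLoopA]
    have : ¬ cs < pos := by omega
    simp [this]
  | succ n ih =>
    intro pos hn hall
    have hlt : cs < pos := by omega
    rw [nearLoopA, dif_pos hlt]
    have hf : dtruthy d (pos - 1) = false := hall _ (by omega) (by omega)
    have hsub := ih (pos - 1) (by omega) (fun k h1 h2 => hall k h1 (by omega))
    rcases hg : dget d (pos - 1) with _ | v
    · simp only [hg]
      rw [hsub]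
      split_ifs with h
      · rfl
      · omega
    · cases v with
      | nil =>
        simp only [hg]
        rw [hsub]
        split_ifs with h
        · rfl
        · omega
      | cons s t =>
        exfalso
        unfold dtruthy at hf
        rw [hg] at hf
        simp at hf

-- A's loop when m is the greatest position in [cs, pos) with truthy data
theorem nearLoopA_found (d : List (Int × List String)) (cs : Int) :
    ∀ n (pos m : Int), (pos - cs).toNat = n →
      cs ≤ m → m < pos → dtruthy d m = true →
      (∀ j, m < j → j < pos → dtruthy d j = false) →
      nearLoopA d cs pos =
        (match dget d m with
         | some (s :: _) => if PySem.Str.len s > 1 then m + PySem.Str.len s else m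
         | _ => m) := by
  intro n
  induction n with
  | zero => intro pos m hn h1 h2 _ _; omega
  | succ n ih =>
    intro pos m hn h1 h2 htr hmax
    have hlt : cs < pos := by omega
    rw [nearLoopA, dif_pos hlt]
    by_cases hm : m = pos - 1
    · subst hm
      obtain ⟨v, hg, hv⟩ := dtruthy_iff.1 htr
      cases v with
      | nil => exact absurd rfl hv
      | cons s t => simp only [hg]
    · have hf : dtruthy d (pos - 1) = false := hmax _ (by omega) (by omega)
      have hsub := ih (pos - 1) m (by omega) h1 (by omega) htr
        (fun j hj1 hj2 => hmax j hj1 (by omega))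
      rcases hg : dget d (pos - 1) with _ | v
      · simpa only [hg] using hsub
      · cases v with
        | nil => simpa only [hg] using hsub
        | cons s t =>
          exfalso
          unfold dtruthy at hf
          rw [hg] at hf
          simp at hf

-- ===== VERDICT (by name: the statement is the Claim_ definition above) =====
theorem near_lt_pos_spec : Claim_equal_near_lt_pos := by
  unfold Claim_equal_near_lt_pos
  intro pos d is_left _ hpre
  obtain ⟨hne, hnd⟩ := hpre
  unfold Spec_near_lt_pos near_lt_pos near_lt_pos_alt
  simp only []
  obtain ⟨⟨k0, v0⟩, t0, rfl⟩ : ∃ kv t, d = kv :: t := by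
    rcases d with _ | ⟨kv, t⟩
    · exact absurd rfl hne
    · exact ⟨kv, t, rfl⟩
  set d := (k0, v0) :: t0 with hd
  set cs : Int := k0 with hcs
  by_cases hguard : is_left = false ∧ dtruthy d pos = true
  · -- not_found is false: both return pos
    obtain ⟨hl, ht⟩ := hguard
    simp [hl, ht]
  · -- not_found is true: A runs the loop, B takes the else branch
    have hnf : (if is_left then true else !(dtruthy d pos)) = true := by
      rcases is_left with _ | _
      · simp only [Bool.false_eq_true, if_false, Bool.not_eq_true']
        by_contra h
        exact hguard ⟨rfl, by revert h; cases dtruthy d pos <;> simp⟩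
      · simp
    have hguard' : (!is_left && dtruthy d pos) = false := by
      rcases is_left with _ | _
      · simp only [Bool.not_false, Bool.true_and]
        by_contra h
        exact hguard ⟨rfl, by revert h; cases dtruthy d pos <;> simp⟩
      · simp
    simp only [hnf, hguard', Bool.false_eq_true, if_true, if_false]
    by_cases hex : ∃ k, cs ≤ k ∧ k < pos ∧ dtruthy d k = true
    · -- something qualifies: bestKeyB is some m, the greatest
      rcases hb : bestKeyB cs pos d with _ | m
      · exfalso
        obtain ⟨k, hk1, hk2, hk3⟩ := hex
        obtain ⟨v, hg, hv⟩ := dtruthy_iff.1 hk3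
        have hmem := dget_mem hg
        have := ((bestKeyB_go (cs := cs) (pos := pos) d none).1).1 hb
        exact this.2 (k, v) hmem ⟨hk1, hk2, hv⟩
      · have hchar := ((bestKeyB_go (cs := cs) (pos := pos) d none).2) m hb
        obtain ⟨h1, h2, _⟩ := hchar
        rcases h1 with h1 | h1
        · simp at h1
        obtain ⟨ha1, ha2, v, hmv, hv⟩ := h1
        have hgm : dget d m = some v := mem_dget hnd hmv
        have htm : dtruthy d m = true := dtruthy_iff.2 ⟨v, hgm, hv⟩
        have hmax : ∀ j, m < j → j < pos → dtruthy d j = false := by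
          intro j hj1 hj2
          by_contra hcon
          rw [Bool.not_eq_false] at hcon
          obtain ⟨v', hg', hv'⟩ := dtruthy_iff.1 hcon
          have := h2 (j, v') (dget_mem hg') (by omega) hj2 hv'
          simp at this
          omega
        rw [nearLoopA_found d cs (pos - cs).toNat pos m rfl ha1 ha2 htm hmax]
        cases v with
        | nil => exact absurd rfl hv
        | cons s t => simp only [hgm]
    · -- nothing qualifies: bestKeyB is none
      push Not at hex
      have hall : ∀ kv ∈ d, ¬(cs ≤ kv.1 ∧ kv.1 < pos ∧ kv.2 ≠ []) := by
        rintro ⟨k, v⟩ hkv ⟨b1, b2, b3⟩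
        have : dtruthy d k = true := dtruthy_iff.2 ⟨v, mem_dget hnd hkv, b3⟩
        have := hex k b1 b2
        simp_all
      have hb : bestKeyB cs pos d = none :=
        ((bestKeyB_go (cs := cs) (pos := pos) d none).1).2 ⟨rfl, hall⟩
      rw [hb]
      rw [nearLoopA_none d cs (pos - cs).toNat pos rfl
        (fun k h1 h2 => by
          by_contra h
          rw [Bool.not_eq_false] at h
          exact absurd h (by simpa using hex k h1 h2))]
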